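-- pv_equiv track=rewrite | github.com/jpjsm/InterviewQuestions | Q63-FindUnitFractionsThatSumToTarget/python/sumunitfractions.py | SumUnitFractions
-- ===== SOURCE A (Python) =====
-- from typing import List, Set
--
-- def SumUnitFractions(l: int, target: int = 1) -> Set[int]:
--     if not isinstance(l, int) or l < 3 or not isinstance(target, int) or target < 1:
--         raise ValueError("Invalid arguments received.")
--
--     result = [2, 3, 6]
--     while len(result) < l:
--         n = result.pop()
--         n1 = n + 1
--         nn = n * n1
--         result.append(n1)
--         result.append(nn)
--
--     if target > 1:
--         for i in range(l):
--             result[i] *= target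
--     return set(result)
-- ===== SOURCE B (Python) =====
-- def SumUnitFractions(l: int, target: int = 1):
--     if not isinstance(l, int) or l < 3 or not isinstance(target, int) or target < 1:
--         raise ValueError("Invalid arguments received.")
--
--     # Greedy unit-fraction expansion of 1: the first l-1 Sylvester numbers
--     # (s0 = 2, s_{k+1} = s^2 - s + 1) and, as the last denominator, their
--     # product (classical identity: prod_{i<k} s_i = s_k - 1).
--     def sylvester(k, s):
--         if k == 0:
--             return [], 1
--         rest, prod = sylvester(k - 1, s * s - s + 1)
--         return [s] + rest, s * prod
--
--     ss, prod = sylvester(l - 1, 2)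
--     return {target * d for d in ss + [prod]}
-- ===== Notes on version B (the rewrite author's own statement) =====
-- stated objective: alternative
-- what changed: B drops A's pop/append splitting of a running last element entirely: it generates the first l-1 Sylvester numbers directly by the quadratic recurrence s -> s^2 - s + 1 in one recursion that simultaneously returns their product, which (by the identity prod s_i = s_next - 1) is the final denominator, then scales everything by target in a set comprehension.
import Mathlib
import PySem

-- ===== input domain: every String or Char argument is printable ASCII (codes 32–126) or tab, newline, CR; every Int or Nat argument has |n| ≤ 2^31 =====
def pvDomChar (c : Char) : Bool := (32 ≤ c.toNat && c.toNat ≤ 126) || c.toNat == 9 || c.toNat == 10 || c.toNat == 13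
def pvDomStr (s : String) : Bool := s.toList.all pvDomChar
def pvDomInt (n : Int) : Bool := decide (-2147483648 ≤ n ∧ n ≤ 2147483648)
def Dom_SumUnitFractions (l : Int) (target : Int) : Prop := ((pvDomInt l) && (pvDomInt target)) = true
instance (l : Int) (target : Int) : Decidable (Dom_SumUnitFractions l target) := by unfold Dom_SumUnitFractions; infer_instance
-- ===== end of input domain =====

-- B replaces A's pop/append splitting loop by a direct recursion on the Sylvester
-- recurrence s -> s^2 - s + 1 that also returns the product of the terms (the final
-- denominator); objective: alternative. A and B raise the same ValueError outside
-- Pre_ (l < 3 or target < 1); nothing is claimed there.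

-- ===== PORT A =====
-- while len(result) < l: n = result.pop(); result += [n+1, n*(n+1)].
-- Fuel = (l-3).toNat: each iteration grows the list by 1, so the while-condition fails
-- exactly when the fuel runs out; the condition is still checked each round.
def pvALoop : Nat → Int → List Int → List Int
  | 0, _, result => result
  | fuel+1, l, result =>
    if (result.length : Int) < l then
      match PySem.List.pop? result with
      | some (n, rest) => pvALoop fuel l (rest ++ [n + 1] ++ [n * (n + 1)])
      | none => result
    else result

def SumUnitFractions (l : Int) (target : Int) : List Int :=
  let result := pvALoop (l - 3).toNat l [2, 3, 6]
  -- 'for i in range(l): result[i] *= target': exact as a map here, since at this point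
  -- len(result) = max(3, l) = l on every input reaching the loop (l ≥ 3 under Pre_).
  let result := if target > 1 then result.map (· * target) else result
  PySem.Set.ofList result

-- ===== PORT B =====
-- def sylvester(k, s): returns (first k Sylvester numbers from s, their product).
def pvSyl : Nat → Int → List Int × Int
  | 0, _ => ([], 1)
  | k+1, s =>
    let r := pvSyl k (s * s - s + 1)
    (s :: r.1, s * r.2)

def SumUnitFractions_alt (l : Int) (target : Int) : List Int :=
  let r := pvSyl (l - 1).toNat 2
  PySem.Set.ofList ((r.1 ++ [r.2]).map (target * ·))

-- ===== PRECONDITION & SPEC =====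
-- Pre_ excludes exactly the inputs on which A raises ValueError (its explicit guard).
def Pre_SumUnitFractions (l : Int) (target : Int) : Prop := 3 ≤ l ∧ 1 ≤ target
instance (l : Int) (target : Int) : Decidable (Pre_SumUnitFractions l target) := by
  unfold Pre_SumUnitFractions; infer_instance

def pvWitness_SumUnitFractions : Int × Int := (5, 2)

def Spec_SumUnitFractions (l : Int) (target : Int) (out : List Int) : Prop := out = SumUnitFractions_alt l target
instance (l : Int) (target : Int) (out : List Int) : Decidable (Spec_SumUnitFractions l target out) := by unfold Spec_SumUnitFractions; infer_instance

-- ===== CLAIM (what is proved, stated in full; the proofs are below) =====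
def Claim_equal_SumUnitFractions : Prop := ∀ (l : Int) (target : Int), Dom_SumUnitFractions l target → Pre_SumUnitFractions l target → Spec_SumUnitFractions l target (SumUnitFractions l target)

-- ===== LEMMAS AND PROOFS =====

-- Proof-only bridge: the sequence A's splitting loop appends after a seed p.
def pvExpand : Nat → Int → List Int
  | 0, p => [p]
  | k+1, p => (p + 1) :: pvExpand k (p * (p + 1))

-- A's loop only ever touches the last element: with fuel k and a list pre ++ [p] of
-- length l - k, it returns pre followed by the splitting expansion of p.
theorem pvALoop_eq_pvExpand (k : Nat) : ∀ (pre : List Int) (p l : Int),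
    ((pre.length : Int) + 1 + k = l) →
    pvALoop k l (pre ++ [p]) = pre ++ pvExpand k p := by
  induction k with
  | zero => intro pre p l _; simp [pvALoop, pvExpand]
  | succ k ih =>
    intro pre p l h
    have hlt : ((pre ++ [p]).length : Int) < l := by
      simp only [List.length_append, List.length_cons, List.length_nil]
      push_cast; omega
    rw [pvALoop, if_pos hlt, PySem.List.pop?_last]
    show pvALoop k l ((pre ++ [p + 1]) ++ [p * (p + 1)]) = pre ++ pvExpand (k + 1) p
    rw [ih (pre ++ [p + 1]) (p * (p + 1)) l (by
      simp only [List.length_append, List.length_cons, List.length_nil]; push_cast; omega)]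
    simp [pvExpand]

-- The splitting expansion of p is the Sylvester run started at p+1 with its product
-- (times p) appended.
theorem pvExpand_eq_pvSyl (k : Nat) : ∀ (p : Int),
    pvExpand k p = (pvSyl k (p + 1)).1 ++ [p * (pvSyl k (p + 1)).2] := by
  induction k with
  | zero => intro p; simp [pvExpand, pvSyl]
  | succ k ih =>
    intro p
    have harg : (p + 1) * (p + 1) - (p + 1) + 1 = p * (p + 1) + 1 := by ring
    simp only [pvExpand, pvSyl, ih (p * (p + 1)), harg]
    simp [mul_assoc]

-- ===== VERDICT (by name: the statement is the Claim_ definition above) =====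
theorem SumUnitFractions_spec : Claim_equal_SumUnitFractions := by
  intro l target _ hpre
  unfold Spec_SumUnitFractions SumUnitFractions SumUnitFractions_alt
  rcases hpre with ⟨hl, htgt⟩
  have h36 : ([2, 3, 6] : List Int) = [2, 3] ++ [6] := rfl
  have hlen : (([2, 3] : List Int).length : Int) + 1 + (l - 3).toNat = l := by
    simp only [List.length_cons, List.length_nil]; omega
  have hk : (l - 1).toNat = (l - 3).toNat + 2 := by omega
  rw [h36, pvALoop_eq_pvExpand (l - 3).toNat [2, 3] 6 l hlen,
      pvExpand_eq_pvSyl, hk]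
  show _ = PySem.Set.ofList ((((2:Int) :: (pvSyl ((l-3).toNat + 1) (2*2-2+1)).1)
      ++ [2 * (pvSyl ((l-3).toNat + 1) (2*2-2+1)).2]).map (target * ·))
  norm_num [pvSyl]
  have h6 : ∀ x : Int, 2 * (3 * x) = 6 * x := fun x => by ring
  by_cases h1 : target > 1
  · simp [h1, mul_comm, h6]
  · have : target = 1 := by omega
    subst this
    simp [h6]
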